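-- pv_equiv track=rewrite | github.com/jlescher/adventofcode | 2017/day24/solve.py | get_longest_then_heaviest_bridge
-- ===== SOURCE A (Python) =====
-- def get_longest_then_heaviest_bridge(node, edges):
--     lenght_and_weight = set()
--     for edge in edges:
--         if node in edge:
--             edges_left = edges[:]
--             edges_left.remove(edge)
--             lenght_and_weight.add(get_longest_then_heaviest_bridge(sum(edge)-node, edges_left))
--     if len(lenght_and_weight) == 0: # Leaf
--         return 1, node
--     else: # At least one domino can be connected to node
--         length, weight = sorted(lenght_and_weight).pop()
--         return length+1, weight + 2*node
-- ===== SOURCE B (Python) =====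
-- def get_longest_then_heaviest_bridge(node, edges):
--     # Iterative DFS with an explicit stack of frames (node, remaining edges,
--     # accumulated length, accumulated weight); threads length/weight top-down
--     # and keeps a running lexicographic best instead of combining tuples
--     # bottom-up through the recursion.
--     best = None
--     stack = [(node, list(edges), 0, 0)]
--     while stack:
--         cur, rem, alen, awt = stack.pop()
--         children = []
--         for edge in rem:
--             if cur in edge:
--                 left = rem[:]
--                 left.remove(edge)
--                 children.append((edge[0] + edge[1] - cur, left, alen + 1, awt + 2 * cur))
--         if children:
--             stack.extend(children)
--         else:
--             cand = (alen + 1, awt + cur)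
--             if best is None or cand > best:
--                 best = cand
--     return best
-- ===== Notes on version B (the rewrite author's own statement) =====
-- stated objective: alternative
-- what changed: Replaces the bottom-up recursion (collecting child results in a set, sorting it and popping the maximum at every node) with an iterative DFS over an explicit stack of frames that threads accumulated length/weight top-down and maintains a single running lexicographic best over leaf candidates.
import Mathlib
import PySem

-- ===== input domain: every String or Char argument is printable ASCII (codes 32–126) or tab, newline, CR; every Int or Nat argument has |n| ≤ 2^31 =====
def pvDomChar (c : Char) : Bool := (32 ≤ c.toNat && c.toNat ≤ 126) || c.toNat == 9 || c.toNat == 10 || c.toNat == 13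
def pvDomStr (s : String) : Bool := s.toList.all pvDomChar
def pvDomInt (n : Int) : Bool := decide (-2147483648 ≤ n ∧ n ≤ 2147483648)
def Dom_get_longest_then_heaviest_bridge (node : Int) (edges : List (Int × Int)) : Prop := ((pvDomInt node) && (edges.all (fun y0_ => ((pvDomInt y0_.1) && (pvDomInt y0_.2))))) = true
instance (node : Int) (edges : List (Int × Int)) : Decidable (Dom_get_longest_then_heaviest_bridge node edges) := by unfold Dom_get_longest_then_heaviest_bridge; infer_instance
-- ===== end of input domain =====

-- B replaces A's bottom-up recursion (child results collected in a set, sorted, max popped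
-- at every node) by an iterative DFS over an explicit stack of frames that threads the
-- accumulated length/weight top-down and keeps one running lexicographic best (objective:
-- alternative decomposition, same exponential cost).

-- ===== PORT A =====
-- for edge in edges: if node in edge: recurse on a copy with .remove(edge);
-- edges_left.remove(edge) removes the FIRST occurrence of the value = edges.erase edge
-- (PySem.List.remove?_eq_some_erase).  sorted(set) of int pairs compares tuples
-- lexicographically = PySem.List.sorted2 with keys fst/snd; .pop() returns the last element.
def get_longest_then_heaviest_bridge (node : Int) (edges : List (Int × Int)) : Int × Int :=
  let s : PySem.Set (Int × Int) :=
    edges.attach.foldl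
      (fun s e =>
        if node = e.1.1 ∨ node = e.1.2 then
          PySem.Set.add s (get_longest_then_heaviest_bridge (e.1.1 + e.1.2 - node) (edges.erase e.1))
        else s)
      PySem.Set.empty
  if PySem.Set.len s = 0 then (1, node)
  else
    match (PySem.List.sorted2 s Prod.fst Prod.snd false).getLast? with
    | some lw => (lw.1 + 1, lw.2 + 2 * node)
    | none => (1, node)  -- unreachable: the set is nonempty in this branch
termination_by edges.length
decreasing_by have := List.length_erase_of_mem e.2; have := List.length_pos_of_mem e.2; omega

-- ===== PORT B =====
-- Python tuple comparison cand > best on int pairs (strict lexicographic)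
def pyLtb (a b : Int × Int) : Bool :=
  decide (a.1 < b.1) || (!decide (b.1 < a.1) && decide (a.2 < b.2))

-- the inner 'for edge in rem: if cur in edge: children.append(...)' loop of Source B
def pvChildren (cur : Int) (rem : List (Int × Int)) (alen awt : Int) :
    List (Int × List (Int × Int) × Int × Int) :=
  rem.foldl (fun cs e =>
    if cur = e.1 ∨ cur = e.2 then
      cs ++ [(e.1 + e.2 - cur, rem.erase e, alen + 1, awt + 2 * cur)]
    else cs) []

lemma pvChildren_eq (cur : Int) (rem : List (Int × Int)) (alen awt : Int) :
    pvChildren cur rem alen awt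
      = (rem.filter (fun e => decide (cur = e.1 ∨ cur = e.2))).map
          (fun e => (e.1 + e.2 - cur, rem.erase e, alen + 1, awt + 2 * cur)) := by
  have h := PySem.List.foldl_append_if (fun e => decide (cur = e.1 ∨ cur = e.2))
    (fun e : Int × Int => (e.1 + e.2 - cur, rem.erase e, alen + 1, awt + 2 * cur)) rem []
  simp only [List.nil_append] at h
  rw [pvChildren, ← h]
  congr 1; funext cs e; simp

lemma pvChildren_sub {cur : Int} {rem : List (Int × Int)} {alen awt : Int} :
    ∀ fr ∈ pvChildren cur rem alen awt, fr.2.1.length + 1 = rem.length := by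
  intro fr h
  rw [pvChildren_eq] at h
  simp only [List.mem_map, List.mem_filter] at h
  obtain ⟨e, ⟨he, -⟩, rfl⟩ := h
  have := List.length_erase_of_mem he
  have := List.length_pos_of_mem he
  simpa using by omega

lemma pvChildren_len {cur : Int} {rem : List (Int × Int)} {alen awt : Int} :
    (pvChildren cur rem alen awt).length ≤ rem.length := by
  rw [pvChildren_eq]
  simpa using List.length_filter_le _ _

lemma pvChildren_meas {cur : Int} {rem : List (Int × Int)} {alen awt : Int} :
    ((pvChildren cur rem alen awt).map (fun f => (f.2.1.length + 1).factorial)).sum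
      < (rem.length + 1).factorial := by
  set cs := pvChildren cur rem alen awt with hcs
  have hval : ∀ x ∈ cs.map (fun f => (f.2.1.length + 1).factorial), x ≤ rem.length.factorial := by
    intro x hx
    simp only [List.mem_map] at hx
    obtain ⟨f, hf, rfl⟩ := hx
    rw [pvChildren_sub f hf]
  calc (cs.map (fun f => (f.2.1.length + 1).factorial)).sum
      ≤ (cs.map (fun f => (f.2.1.length + 1).factorial)).length • rem.length.factorial :=
        List.sum_le_card_nsmul _ _ hval
    _ = cs.length * rem.length.factorial := by simp [smul_eq_mul]
    _ ≤ rem.length * rem.length.factorial := Nat.mul_le_mul_right _ pvChildren_len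
    _ < (rem.length + 1).factorial := by
        rw [Nat.factorial_succ]
        have := Nat.factorial_pos rem.length
        nlinarith

-- the 'while stack:' loop of Source B; the head of the list is the top of the stack
-- (Python's stack.pop() takes the top; stack.extend(children) puts the last child on top,
-- hence cs.reverse ++ rest)
def pvRunB (stack : List (Int × List (Int × Int) × Int × Int)) (best : Option (Int × Int)) :
    Option (Int × Int) :=
  match stack with
  | [] => best
  | fr :: rest =>
    let cs := pvChildren fr.1 fr.2.1 fr.2.2.1 fr.2.2.2
    if cs.isEmpty then
      let cand : Int × Int := (fr.2.2.1 + 1, fr.2.2.2 + fr.1)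
      let best' := match best with
        | none => some cand
        | some b => if pyLtb b cand then some cand else some b
      pvRunB rest best'
    else
      pvRunB (cs.reverse ++ rest) best
termination_by (stack.map (fun f => (f.2.1.length + 1).factorial)).sum
decreasing_by
  · simp; positivity
  · simp only [List.map_append, List.sum_append, List.map_reverse, List.sum_reverse,
      List.map_cons, List.sum_cons]
    have := pvChildren_meas (cur := fr.1) (rem := fr.2.1) (alen := fr.2.2.1) (awt := fr.2.2.2)
    omega

-- best is never None on return (the initial frame always yields at least one leaf
-- candidate — proved below); the .getD default is unreachable
def get_longest_then_heaviest_bridge_alt (node : Int) (edges : List (Int × Int)) : Int × Int :=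
  (pvRunB [(node, edges, 0, 0)] none).getD (1, node)

-- ===== PRECONDITION & SPEC =====
def Spec_get_longest_then_heaviest_bridge (node : Int) (edges : List (Int × Int)) (out : Int × Int) : Prop := out = get_longest_then_heaviest_bridge_alt node edges
instance (node : Int) (edges : List (Int × Int)) (out : Int × Int) : Decidable (Spec_get_longest_then_heaviest_bridge node edges out) := by unfold Spec_get_longest_then_heaviest_bridge; infer_instance

-- ===== CLAIM (what is proved, stated in full; the proofs are below) =====
def Claim_equal_get_longest_then_heaviest_bridge : Prop := ∀ (node : Int) (edges : List (Int × Int)), Dom_get_longest_then_heaviest_bridge node edges → Spec_get_longest_then_heaviest_bridge node edges (get_longest_then_heaviest_bridge node edges)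

-- ===== LEMMAS AND PROOFS =====

-- strict lexicographic order on Int pairs, in Prop form
lemma pyLtb_iff (a b : Int × Int) :
    pyLtb a b = true ↔ (a.1 < b.1 ∨ (a.1 = b.1 ∧ a.2 < b.2)) := by
  simp only [pyLtb, Bool.or_eq_true, Bool.and_eq_true, Bool.not_eq_eq_eq_not, Bool.not_true,
    decide_eq_true_eq, decide_eq_false_iff_not]
  omega

lemma pyLtb_irrefl (a : Int × Int) : pyLtb a a = false := by
  rw [Bool.eq_false_iff, Ne, pyLtb_iff]; omega

lemma pyLtb_asymm {a b : Int × Int} (h : pyLtb a b = true) : pyLtb b a = false := by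
  rw [pyLtb_iff] at h
  rw [Bool.eq_false_iff, Ne, pyLtb_iff]; omega

lemma pyLtb_trans {a b c : Int × Int} (h1 : pyLtb a b = true) (h2 : pyLtb b c = true) :
    pyLtb a c = true := by
  rw [pyLtb_iff] at h1 h2 ⊢; omega

lemma pyLtb_neg_trans {a b c : Int × Int} (h1 : pyLtb a b = false) (h2 : pyLtb b c = false) :
    pyLtb a c = false := by
  rw [Bool.eq_false_iff, Ne, pyLtb_iff] at h1 h2 ⊢; omega

lemma pyLtb_antisymm {a b : Int × Int} (h1 : pyLtb a b = false) (h2 : pyLtb b a = false) :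
    a = b := by
  rw [Bool.eq_false_iff, Ne, pyLtb_iff] at h1 h2
  obtain ⟨x, y⟩ := a; obtain ⟨u, v⟩ := b
  simp_all; omega

lemma pyLtb_shift (d1 d2 : Int) (a b : Int × Int) :
    pyLtb (d1 + a.1, d2 + a.2) (d1 + b.1, d2 + b.2) = pyLtb a b := by
  rw [Bool.eq_iff_iff, pyLtb_iff, pyLtb_iff]; dsimp only; omega

-- the child results of A, in iteration order (duplicates kept)
def crsOf (node : Int) (edges : List (Int × Int)) : List (Int × Int) :=
  (edges.filter (fun e => decide (node = e.1 ∨ node = e.2))).map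
    (fun e => get_longest_then_heaviest_bridge (e.1 + e.2 - node) (edges.erase e))

abbrev LexMax (vs : List (Int × Int)) (m : Int × Int) : Prop :=
  m ∈ vs ∧ ∀ y ∈ vs, pyLtb m y = false

lemma LexMax_unique {vs : List (Int × Int)} {m m' : Int × Int}
    (h : LexMax vs m) (h' : LexMax vs m') : m = m' :=
  pyLtb_antisymm (h.2 m' h'.1) (h'.2 m h.1)

lemma LexMax_congr {vs vs' : List (Int × Int)} (hmem : ∀ y, y ∈ vs ↔ y ∈ vs')
    {m : Int × Int} (h : LexMax vs m) : LexMax vs' m :=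
  ⟨(hmem m).1 h.1, fun y hy => h.2 y ((hmem y).2 hy)⟩

-- conditional Set.add fold = Set.ofList of the filtered/mapped list
lemma foldl_condadd (p : Int × Int → Bool) (g : Int × Int → Int × Int) :
    ∀ (l : List (Int × Int)) (acc : PySem.Set (Int × Int)),
      l.foldl (fun s e => if p e = true then PySem.Set.add s (g e) else s) acc
        = ((l.filter p).map g).foldl PySem.Set.add acc := by
  intro l
  induction l with
  | nil => intro acc; rfl
  | cons x t ih =>
    intro acc
    by_cases hx : p x = true <;> simp [List.foldl_cons, hx, ih]

lemma ofList_eq_nil_iff (l : List (Int × Int)) : PySem.Set.ofList l = [] ↔ l = [] := by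
  constructor
  · intro h
    cases l with
    | nil => rfl
    | cons x t =>
      have : x ∈ PySem.Set.ofList (x :: t) := (PySem.Set.mem_ofList _ _).2 (by simp)
      rw [h] at this; simp at this
  · rintro rfl; rfl

-- insertion sort with pyLtb keeps the list nondecreasing
lemma insertBy_pairwise (x : Int × Int) (l : List (Int × Int))
    (h : l.Pairwise (fun p q => pyLtb q p = false)) :
    (PySem.List.insertBy pyLtb x l).Pairwise (fun p q => pyLtb q p = false) := by
  induction l with
  | nil => simp [show PySem.List.insertBy pyLtb x [] = [x] from rfl]
  | cons y ys ih =>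
    rw [List.pairwise_cons] at h
    obtain ⟨hy, hys⟩ := h
    rw [show PySem.List.insertBy pyLtb x (y :: ys)
        = if pyLtb x y then x :: y :: ys else y :: PySem.List.insertBy pyLtb x ys from rfl]
    by_cases hb : pyLtb x y = true
    · rw [if_pos hb]
      refine List.pairwise_cons.2 ⟨?_, List.pairwise_cons.2 ⟨hy, hys⟩⟩
      intro z hz
      rcases List.mem_cons.1 hz with rfl | hz'
      · exact pyLtb_asymm hb
      · -- pyLtb z x = false: if z < x then with x < y, z < y, contradicting hy
        rw [Bool.eq_false_iff, Ne]
        intro hzx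
        have := pyLtb_trans hzx hb
        rw [hy z hz'] at this; exact Bool.false_ne_true this
    · rw [if_neg hb]
      refine List.pairwise_cons.2 ⟨?_, ih hys⟩
      intro z hz
      rcases (PySem.List.mem_insertBy pyLtb x z ys).1 hz with rfl | hz'
      · exact Bool.eq_false_iff.2 hb
      · exact hy z hz'

lemma foldl_insertBy_pairwise (xs : List (Int × Int)) :
    ∀ l, l.Pairwise (fun p q => pyLtb q p = false) →
      (xs.foldl (fun acc x => PySem.List.insertBy pyLtb x acc) l).Pairwise
        (fun p q => pyLtb q p = false) := by
  induction xs with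
  | nil => intro l hl; exact hl
  | cons x t ih => intro l hl; exact ih _ (insertBy_pairwise x l hl)

lemma sorted2_pairwise' (xs : List (Int × Int)) :
    (PySem.List.sorted2 xs Prod.fst Prod.snd false).Pairwise (fun p q => pyLtb q p = false) := by
  rw [show PySem.List.sorted2 xs Prod.fst Prod.snd false
      = xs.foldl (fun acc x => PySem.List.insertBy pyLtb x acc) [] from rfl]
  exact foldl_insertBy_pairwise xs [] (by simp)

lemma mem_of_getLast?_eq_some {l : List (Int × Int)} {a : Int × Int}
    (h : l.getLast? = some a) : a ∈ l := by
  rw [List.getLast?_eq_some_iff] at h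
  obtain ⟨l', rfl⟩ := h; simp

lemma pairwise_getLast_max : ∀ (l : List (Int × Int)) (m : Int × Int),
    l.Pairwise (fun p q => pyLtb q p = false) → l.getLast? = some m →
    ∀ y ∈ l, pyLtb m y = false := by
  intro l
  induction l with
  | nil => intro m _ h; simp at h
  | cons a t ih =>
    intro m hp hl y hy
    rw [List.pairwise_cons] at hp
    cases t with
    | nil =>
      simp at hl hy
      subst hl; subst hy; exact pyLtb_irrefl _
    | cons b t' =>
      rw [List.getLast?_cons_cons] at hl
      rcases List.mem_cons.1 hy with rfl | hy'
      · exact hp.1 m (mem_of_getLast?_eq_some hl)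
      · exact ih m hp.2 hl y hy'

-- A computes (1, node) on a leaf and otherwise 1 + length / weight + 2*node of the
-- lexicographic maximum of its child results
lemma gltb_char (node : Int) (edges : List (Int × Int)) :
    (crsOf node edges = [] → get_longest_then_heaviest_bridge node edges = (1, node)) ∧
    (crsOf node edges ≠ [] → ∃ M, LexMax (crsOf node edges) M ∧
      get_longest_then_heaviest_bridge node edges = (M.1 + 1, M.2 + 2 * node)) := by
  rw [get_longest_then_heaviest_bridge]
  have hfold :
      edges.attach.foldl
        (fun s e =>
          if node = e.1.1 ∨ node = e.1.2 then
            PySem.Set.add s (get_longest_then_heaviest_bridge (e.1.1 + e.1.2 - node) (edges.erase e.1))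
          else s)
        PySem.Set.empty
      = PySem.Set.ofList (crsOf node edges) := by
    rw [show (fun (s : PySem.Set (Int × Int)) (e : {x // x ∈ edges}) =>
          if node = e.1.1 ∨ node = e.1.2 then
            PySem.Set.add s (get_longest_then_heaviest_bridge (e.1.1 + e.1.2 - node) (edges.erase e.1))
          else s)
        = (fun s e => (fun (s : PySem.Set (Int × Int)) (x : Int × Int) =>
            if decide (node = x.1 ∨ node = x.2) = true then
              PySem.Set.add s (get_longest_then_heaviest_bridge (x.1 + x.2 - node) (edges.erase x))
            else s) s e.1) from by funext s e; simp]
    rw [List.foldl_attach (l := edges)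
      (f := fun (s : PySem.Set (Int × Int)) (x : Int × Int) =>
        if decide (node = x.1 ∨ node = x.2) = true then
          PySem.Set.add s (get_longest_then_heaviest_bridge (x.1 + x.2 - node) (edges.erase x))
        else s) (b := PySem.Set.empty)]
    rw [foldl_condadd, crsOf, PySem.Set.ofList_eq_foldl]
    rfl
  rw [hfold]
  by_cases hnil : crsOf node edges = []
  · refine ⟨fun _ => ?_, fun h => absurd hnil h⟩
    rw [hnil]
    simp [PySem.Set.ofList_eq_foldl, PySem.Set.len]
  · have hsnil : PySem.Set.ofList (crsOf node edges) ≠ [] := by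
      intro h; exact hnil ((ofList_eq_nil_iff _).1 h)
    have hlen : ¬ PySem.Set.len (PySem.Set.ofList (crsOf node edges)) = 0 := by
      simp only [PySem.Set.len]
      intro h
      apply hsnil
      have : (PySem.Set.ofList (crsOf node edges)).length = 0 := by omega
      exact List.length_eq_zero_iff.1 this
    rw [if_neg hlen]
    -- the sorted list is nonempty
    set st := PySem.List.sorted2 (PySem.Set.ofList (crsOf node edges)) Prod.fst Prod.snd false
      with hst
    have hperm : st.Perm (PySem.Set.ofList (crsOf node edges)) :=
      PySem.List.sorted2_perm _ _ _ _
    have hstnil : st ≠ [] := by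
      intro h; exact hsnil (List.Perm.nil_eq (h ▸ hperm)).symm
    obtain ⟨m, hm⟩ := Option.isSome_iff_exists.1 (List.getLast?_isSome.2 hstnil)
    rw [hm]
    refine ⟨fun h => absurd h hnil, fun _ => ⟨m, ⟨?_, ?_⟩, rfl⟩⟩
    · have : m ∈ st := mem_of_getLast?_eq_some hm
      exact (PySem.Set.mem_ofList _ _).1 (hperm.mem_iff.1 this)
    · intro y hy
      refine pairwise_getLast_max st m (sorted2_pairwise' _) hm y ?_
      exact hperm.mem_iff.2 ((PySem.Set.mem_ofList _ _).2 hy)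

-- value of a frame: accumulators plus A's result from the frame's state
def evalF (fr : Int × List (Int × Int) × Int × Int) : Int × Int :=
  (fr.2.2.1 + (get_longest_then_heaviest_bridge fr.1 fr.2.1).1,
   fr.2.2.2 + (get_longest_then_heaviest_bridge fr.1 fr.2.1).2)

def lmax (v c : Int × Int) : Int × Int := if pyLtb v c then c else v

def omax (b : Option (Int × Int)) (c : Int × Int) : Option (Int × Int) :=
  some (match b with | none => c | some v => lmax v c)

lemma lmax_mem (v c : Int × Int) : lmax v c = v ∨ lmax v c = c := by
  unfold lmax; split <;> simp

lemma lmax_ge_left (v c : Int × Int) : pyLtb (lmax v c) v = false := by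
  unfold lmax; split
  · exact pyLtb_asymm (by assumption)
  · exact pyLtb_irrefl v

lemma lmax_ge_right (v c : Int × Int) : pyLtb (lmax v c) c = false := by
  unfold lmax; split
  · exact pyLtb_irrefl c
  · exact Bool.eq_false_iff.2 (by assumption)

lemma foldl_omax_some : ∀ (vs : List (Int × Int)) (v : Int × Int),
    ∃ w, vs.foldl omax (some v) = some w ∧ LexMax (v :: vs) w := by
  intro vs
  induction vs with
  | nil =>
    intro v
    exact ⟨v, rfl, by simp, by intro y hy; simp at hy; subst hy; exact pyLtb_irrefl _⟩
  | cons c t ih =>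
    intro v
    obtain ⟨w, hw, hwmem, hwmax⟩ := ih (lmax v c)
    refine ⟨w, ?_, ?_, ?_⟩
    · simpa [omax] using hw
    · rcases List.mem_cons.1 hwmem with rfl | hw'
      · rcases lmax_mem v c with h | h <;> rw [h] <;> simp
      · simp [hw']
    · intro y hy
      have hwl : pyLtb w (lmax v c) = false := hwmax _ (by simp)
      rcases List.mem_cons.1 hy with rfl | hy'
      · exact pyLtb_neg_trans hwl (lmax_ge_left _ _)
      · rcases List.mem_cons.1 hy' with rfl | hy''
        · exact pyLtb_neg_trans hwl (lmax_ge_right _ _)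
        · exact hwmax y (by simp [hy''])

-- fold of the running best over a list whose values have maximum M
lemma foldl_omax_of_isMax {l : List (Int × List (Int × Int) × Int × Int)} {M : Int × Int}
    (hne : l ≠ []) (hM : LexMax (l.map evalF) M) :
    ∀ best, l.foldl (fun b fr => omax b (evalF fr)) best = omax best M := by
  intro best
  rw [show l.foldl (fun b fr => omax b (evalF fr)) best = (l.map evalF).foldl omax best from
    (List.foldl_map (f := evalF) (g := omax) (l := l) (init := best)).symm]
  cases best with
  | some v =>
    obtain ⟨w, hw, hmax⟩ := foldl_omax_some (l.map evalF) v
    rw [hw]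
    have hM' : LexMax (v :: l.map evalF) (lmax v M) := by
      constructor
      · rcases lmax_mem v M with h | h <;> rw [h]
        · simp
        · exact List.mem_cons_of_mem _ hM.1
      · intro y hy
        rcases List.mem_cons.1 hy with rfl | hy'
        · exact lmax_ge_left _ _
        · exact pyLtb_neg_trans (lmax_ge_right v M) (hM.2 y hy')
    rw [LexMax_unique hmax hM']
    rfl
  | none =>
    cases hl : l.map evalF with
    | nil => exact absurd (List.map_eq_nil_iff.1 hl) hne
    | cons c t =>
      have : (c :: t).foldl omax none = t.foldl omax (some c) := rfl
      rw [this]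
      obtain ⟨w, hw, hmax⟩ := foldl_omax_some t c
      rw [hw]
      have : w = M := LexMax_unique hmax (hl ▸ hM)
      rw [this]; rfl

lemma children_empty_iff {cur : Int} {rem : List (Int × Int)} {alen awt : Int} :
    pvChildren cur rem alen awt = [] ↔ crsOf cur rem = [] := by
  rw [pvChildren_eq, crsOf]
  simp

-- the value of a frame is the maximum of its children's values
lemma evalF_children {cur : Int} {rem : List (Int × Int)} {alen awt : Int}
    (h : pvChildren cur rem alen awt ≠ []) :
    LexMax ((pvChildren cur rem alen awt).map evalF) (evalF (cur, rem, alen, awt)) := by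
  have hcrs : crsOf cur rem ≠ [] := fun hc => h (children_empty_iff.2 hc)
  obtain ⟨M, hMmax, hMval⟩ := (gltb_char cur rem).2 hcrs
  have hmap : (pvChildren cur rem alen awt).map evalF
      = (crsOf cur rem).map (fun p => (alen + 1 + p.1, awt + 2 * cur + p.2)) := by
    rw [pvChildren_eq, crsOf, List.map_map, List.map_map]
    rfl
  have hval : evalF (cur, rem, alen, awt) = (alen + 1 + M.1, awt + 2 * cur + M.2) := by
    simp only [evalF, hMval, Prod.mk.injEq]; omega
  rw [hmap, hval]
  constructor
  · exact List.mem_map_of_mem hMmax.1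
  · intro y hy
    obtain ⟨z, hz, rfl⟩ := List.mem_map.1 hy
    have := pyLtb_shift (alen + 1) (awt + 2 * cur) M z
    rw [this]
    exact hMmax.2 z hz

lemma match_omax (best : Option (Int × Int)) (c : Int × Int) :
    (match best with
     | none => some c
     | some b => if pyLtb b c then some c else some b) = omax best c := by
  cases best with
  | none => rfl
  | some b => simp only [omax, lmax]; split <;> rfl

-- one-step equations of the stack loop
lemma pvRunB_leaf {cur : Int} {rem : List (Int × Int)} {alen awt : Int}
    {rest : List (Int × List (Int × Int) × Int × Int)} {best : Option (Int × Int)}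
    (h : pvChildren cur rem alen awt = []) :
    pvRunB ((cur, rem, alen, awt) :: rest) best
      = pvRunB rest (match best with
          | none => some (alen + 1, awt + cur)
          | some b => if pyLtb b (alen + 1, awt + cur) then some (alen + 1, awt + cur)
                      else some b) := by
  rw [pvRunB]; simp [h]

lemma pvRunB_branch {cur : Int} {rem : List (Int × Int)} {alen awt : Int}
    {rest : List (Int × List (Int × Int) × Int × Int)} {best : Option (Int × Int)}
    (h : pvChildren cur rem alen awt ≠ []) :
    pvRunB ((cur, rem, alen, awt) :: rest) best
      = pvRunB ((pvChildren cur rem alen awt).reverse ++ rest) best := by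
  rw [pvRunB]; simp [List.isEmpty_iff, h]

-- the stack loop computes the running maximum of the values of all frames it visits
lemma run_eq : ∀ (stack : List (Int × List (Int × Int) × Int × Int)) (best : Option (Int × Int)),
    pvRunB stack best = stack.foldl (fun b fr => omax b (evalF fr)) best := by
  intro stack best
  induction stack, best using pvRunB.induct with
  | case1 best => simp [pvRunB]
  | case2 best fr rest cs hcs cand best' ih =>
    obtain ⟨cur, rem, alen, awt⟩ := fr
    have hempty : pvChildren cur rem alen awt = [] := List.isEmpty_iff.1 hcs
    have hleaf : get_longest_then_heaviest_bridge cur rem = (1, cur) :=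
      (gltb_char _ _).1 (children_empty_iff.1 hempty)
    have heval : evalF (cur, rem, alen, awt) = (alen + 1, awt + cur) := by
      simp [evalF, hleaf]
    have ih' : pvRunB rest (match best with
        | none => some ((alen + 1 : Int), awt + cur)
        | some b => if pyLtb b (alen + 1, awt + cur) then some ((alen + 1 : Int), awt + cur)
                    else some b)
        = List.foldl (fun b fr => omax b (evalF fr)) (match best with
        | none => some ((alen + 1 : Int), awt + cur)
        | some b => if pyLtb b (alen + 1, awt + cur) then some ((alen + 1 : Int), awt + cur)
                    else some b) rest := ih
    rw [pvRunB_leaf hempty, ih', match_omax, List.foldl_cons, heval]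
  | case3 best fr rest cs hcs ih =>
    obtain ⟨cur, rem, alen, awt⟩ := fr
    have hne : pvChildren cur rem alen awt ≠ [] := fun h => hcs (List.isEmpty_iff.2 h)
    have ih' : pvRunB ((pvChildren cur rem alen awt).reverse ++ rest) best
        = List.foldl (fun b fr => omax b (evalF fr)) best
            ((pvChildren cur rem alen awt).reverse ++ rest) := ih
    rw [pvRunB_branch hne, ih', List.foldl_append, List.foldl_cons]
    congr 1
    have hmax := evalF_children (cur := cur) (rem := rem) (alen := alen) (awt := awt) hne
    have hmax' : LexMax (((pvChildren cur rem alen awt).reverse).map evalF)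
        (evalF (cur, rem, alen, awt)) := by
      refine LexMax_congr (fun y => ?_) hmax
      simp [List.mem_map, List.mem_reverse]
    exact foldl_omax_of_isMax (by simpa using hne) hmax' best

-- ===== VERDICT (by name: the statement is the Claim_ definition above) =====
theorem get_longest_then_heaviest_bridge_spec : Claim_equal_get_longest_then_heaviest_bridge := by
  intro node edges _
  unfold Spec_get_longest_then_heaviest_bridge get_longest_then_heaviest_bridge_alt
  rw [run_eq]
  simp only [List.foldl_cons, List.foldl_nil]
  have : evalF (node, edges, 0, 0) = get_longest_then_heaviest_bridge node edges := by
    simp [evalF]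
  rw [show omax none (evalF (node, edges, 0, 0)) = some (evalF (node, edges, 0, 0)) from rfl,
    this]
  rfl
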